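-- pv_equiv track=rewrite | github.com/Accelerator87/Skyweaver-Deck-Tracker | create cards library/create library.py | get_html_url
-- ===== SOURCE A (Python) =====
-- def get_html_url(inner):
--
--     start = "https"
--     end = "png"
--     url = ""
--     for i in range(0,len(inner)):
--         tmpS = inner[i:i+5]
--         if start == tmpS:
--             for j in range(i+5,len(inner)):
--                 tmpE = inner[j:j+3]
--                 if end == tmpE:
--                     url = inner[i:j+3]
--                     return url
-- ===== SOURCE B (Python) =====
-- def get_html_url(inner):
--     start = None
--     for k in range(len(inner)):
--         if start is None:
--             if inner.startswith("https", k):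
--                 start = k
--         elif inner.startswith("png", k):
--             return inner[start:k + 3]
-- ===== Notes on version B (the rewrite author's own statement) =====
-- stated objective: alternative
-- what changed: Replaces A's nested loops (outer scan for 'https', restarted inner scan for 'png') by a single left-to-right pass with one piece of state (the recorded start index once 'https' is seen); correct because 'png' cannot begin strictly inside an 'https' occurrence, so scanning for 'png' from start+1 equals A's scan from start+5.
import Mathlib
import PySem

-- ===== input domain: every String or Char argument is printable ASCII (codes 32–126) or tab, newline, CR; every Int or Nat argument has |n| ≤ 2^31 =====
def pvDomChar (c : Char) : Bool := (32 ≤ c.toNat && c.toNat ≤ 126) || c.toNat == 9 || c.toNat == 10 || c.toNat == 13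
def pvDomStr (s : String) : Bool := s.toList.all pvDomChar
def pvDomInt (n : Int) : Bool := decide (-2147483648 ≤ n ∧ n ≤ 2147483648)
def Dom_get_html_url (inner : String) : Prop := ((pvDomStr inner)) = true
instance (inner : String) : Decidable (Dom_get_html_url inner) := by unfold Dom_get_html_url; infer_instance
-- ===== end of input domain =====

-- B replaces A's nested scans (outer scan for "https", restarted inner scan for "png") by a
-- single left-to-right pass with one piece of state (the recorded start index); objective:
-- alternative decomposition, linear single pass instead of nested loops.

-- ===== PORT A =====
-- inner loop: for j in range(i+5, len(inner)): if inner[j:j+3] == "png": return inner[i:j+3]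
def pvAInner (s : List Char) (i j : Nat) : Option (List Char) :=
  if j < s.length then
    if PySem.List.slice s (some (j : Int)) (some ((j : Int) + 3)) = "png".toList then
      some (PySem.List.slice s (some (i : Int)) (some ((j : Int) + 3)))
    else pvAInner s i (j + 1)
  else none
termination_by s.length - j

-- outer loop: for i in range(0, len(inner)): if inner[i:i+5] == "https": <inner loop>
def pvAOuter (s : List Char) (i : Nat) : Option (List Char) :=
  if i < s.length then
    if PySem.List.slice s (some (i : Int)) (some ((i : Int) + 5)) = "https".toList then
      match pvAInner s i (i + 5) with
      | some u => some u
      | none => pvAOuter s (i + 1)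
    else pvAOuter s (i + 1)
  else none
termination_by s.length - i

def get_html_url (inner : String) : Option String :=
  (pvAOuter inner.toList 0).map String.ofList

-- ===== PORT B =====
-- the single pass: for k in range(len(inner)), state 'start : Option Nat';
-- inner.startswith(p, k) is exactly 'p <+: drop k' = PySem.Chars.startswith (drop k) p
def pvBLoop (s : List Char) (k : Nat) (start : Option Nat) : Option (List Char) :=
  if k < s.length then
    match start with
    | none =>
        if PySem.Chars.startswith (s.drop k) "https".toList then pvBLoop s (k + 1) (some k)
        else pvBLoop s (k + 1) none
    | some i =>
        if PySem.Chars.startswith (s.drop k) "png".toList then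
          some (PySem.List.slice s (some (i : Int)) (some ((k : Int) + 3)))
        else pvBLoop s (k + 1) (some i)
  else none
termination_by s.length - k

def get_html_url_alt (inner : String) : Option String :=
  (pvBLoop inner.toList 0 none).map String.ofList

-- ===== PRECONDITION & SPEC =====
def Spec_get_html_url (inner : String) (out : Option String) : Prop := out = get_html_url_alt inner
instance (inner : String) (out : Option String) : Decidable (Spec_get_html_url inner out) := by unfold Spec_get_html_url; infer_instance

-- ===== CLAIM (what is proved, stated in full; the proofs are below) =====
def Claim_equal_get_html_url : Prop := ∀ (inner : String), Dom_get_html_url inner → Spec_get_html_url inner (get_html_url inner)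

-- ===== LEMMAS AND PROOFS =====

-- inner[j:j+k] == p  ↔  p is a prefix of drop j   (when p has length k)
theorem pv_slice_eq_iff (sL : List Char) (j k : Nat) (p : List Char) (hk : p.length = k) :
    PySem.List.slice sL (some (j : Int)) (some ((j : Int) + (k : Int))) = p ↔ p <+: sL.drop j := by
  rw [PySem.List.slice_natCast_add, ← hk, List.prefix_iff_eq_take (l₁ := p), eq_comm]

theorem pv_slice3 (sL : List Char) (j : Nat) :
    PySem.List.slice sL (some (j : Int)) (some ((j : Int) + 3)) = "png".toList ↔
      "png".toList <+: sL.drop j := by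
  have h := pv_slice_eq_iff sL j 3 "png".toList (by decide)
  norm_num at h
  exact h

theorem pv_slice5 (sL : List Char) (j : Nat) :
    PySem.List.slice sL (some (j : Int)) (some ((j : Int) + 5)) = "https".toList ↔
      "https".toList <+: sL.drop j := by
  have h := pv_slice_eq_iff sL j 5 "https".toList (by decide)
  norm_num at h
  exact h

-- "png" cannot start strictly inside an occurrence of "https"
theorem pv_no_png_in_https (sL : List Char) (k : Nat)
    (h : "https".toList <+: sL.drop k) :
    ∀ j, k < j → j < k + 5 → ¬ ("png".toList <+: sL.drop j) := by
  intro j h1 h2 hp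
  obtain ⟨t, ht⟩ := h
  obtain ⟨u, hu⟩ := hp
  have hdj : sL.drop j = ("https".toList ++ t).drop (j - k) := by
    rw [ht, List.drop_drop, Nat.add_sub_cancel' (by omega)]
  rw [hdj] at hu
  have h5 : "https".toList = ['h','t','t','p','s'] := rfl
  have h3 : "png".toList = ['p','n','g'] := rfl
  rw [h5, h3] at hu
  have hd1 : 1 ≤ j - k := by omega
  have hd4 : j - k ≤ 4 := by omega
  set dcase := j - k with hdc
  interval_cases dcase <;> simp at hu

theorem pv_inner_none (sL : List Char) (i m : Nat)
    (hnone : ∀ j', m ≤ j' → ¬ ("png".toList <+: sL.drop j')) :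
    ∀ j, m ≤ j → pvAInner sL i j = none := by
  have main : ∀ d j, sL.length - j = d → m ≤ j → pvAInner sL i j = none := by
    intro d
    induction d with
    | zero =>
      intro j hd _
      unfold pvAInner
      rw [if_neg (by omega)]
    | succ d ih =>
      intro j hd hm
      unfold pvAInner
      by_cases h : j < sL.length
      · rw [if_pos h, if_neg (fun hc => hnone j hm ((pv_slice3 sL j).1 hc))]
        exact ih (j + 1) (by omega) (by omega)
      · rw [if_neg h]
  exact fun j hj => main (sL.length - j) j rfl hj

theorem pv_inner_found (sL : List Char) (i jn : Nat)
    (hjn : "png".toList <+: sL.drop jn) :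
    ∀ j, j ≤ jn → (∀ j', j ≤ j' → j' < jn → ¬ ("png".toList <+: sL.drop j')) →
    pvAInner sL i j = some (PySem.List.slice sL (some (i : Int)) (some ((jn : Int) + 3))) := by
  have hlt : jn < sL.length := by
    have := hjn.length_le
    simp at this
    omega
  have main : ∀ d j, jn - j = d → j ≤ jn →
      (∀ j', j ≤ j' → j' < jn → ¬ ("png".toList <+: sL.drop j')) →
      pvAInner sL i j = some (PySem.List.slice sL (some (i : Int)) (some ((jn : Int) + 3))) := by
    intro d
    induction d with
    | zero =>
      intro j hd hj _
      have : j = jn := by omega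
      subst this
      unfold pvAInner
      rw [if_pos hlt, if_pos ((pv_slice3 sL j).2 hjn)]
    | succ d ih =>
      intro j hd hj hno
      unfold pvAInner
      rw [if_pos (by omega), if_neg (fun hc => hno j le_rfl (by omega) ((pv_slice3 sL j).1 hc))]
      exact ih (j + 1) (by omega) (by omega) (fun j' h1 h2 => hno j' (by omega) h2)
  exact fun j hj hno => main (jn - j) j rfl hj hno

theorem pv_outer_none (sL : List Char) (m : Nat)
    (hm : ∀ j', m ≤ j' → ¬ ("png".toList <+: sL.drop j')) :
    ∀ i, m ≤ i + 5 → pvAOuter sL i = none := by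
  have main : ∀ d i, sL.length - i = d → m ≤ i + 5 → pvAOuter sL i = none := by
    intro d
    induction d with
    | zero =>
      intro i hd _
      unfold pvAOuter
      rw [if_neg (by omega)]
    | succ d ih =>
      intro i hd hmi
      unfold pvAOuter
      by_cases hi : i < sL.length
      · rw [if_pos hi]
        by_cases hc : PySem.List.slice sL (some (i : Int)) (some ((i : Int) + 5)) = "https".toList
        · rw [if_pos hc, pv_inner_none sL i m hm (i + 5) hmi]
          exact ih (i + 1) (by omega) (by omega)
        · rw [if_neg hc]
          exact ih (i + 1) (by omega) (by omega)
      · rw [if_neg hi]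
  exact fun i hmi => main (sL.length - i) i rfl hmi

-- B's pass with a recorded start: no "png" at any position from m on → none
theorem pvB_some_none (sL : List Char) (i m : Nat)
    (hno : ∀ j', m ≤ j' → ¬ ("png".toList <+: sL.drop j')) :
    ∀ j, m ≤ j → pvBLoop sL j (some i) = none := by
  have main : ∀ d j, sL.length - j = d → m ≤ j → pvBLoop sL j (some i) = none := by
    intro d
    induction d with
    | zero =>
      intro j hd _
      unfold pvBLoop
      rw [if_neg (by omega)]
    | succ d ih =>
      intro j hd hm
      unfold pvBLoop
      by_cases h : j < sL.length
      · rw [if_pos h]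
        simp only
        rw [if_neg (fun hc => hno j hm ((PySem.Chars.startswith_iff _ _).1 hc))]
        exact ih (j + 1) (by omega) (by omega)
      · rw [if_neg h]
  exact fun j hj => main (sL.length - j) j rfl hj

-- B's pass with a recorded start: first "png" at jn → the slice i..jn+3
theorem pvB_some_found (sL : List Char) (i jn : Nat)
    (hjn : "png".toList <+: sL.drop jn) :
    ∀ j, j ≤ jn → (∀ j', j ≤ j' → j' < jn → ¬ ("png".toList <+: sL.drop j')) →
    pvBLoop sL j (some i) = some (PySem.List.slice sL (some (i : Int)) (some ((jn : Int) + 3))) := by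
  have hlt : jn < sL.length := by
    have := hjn.length_le
    simp at this
    omega
  have main : ∀ d j, jn - j = d → j ≤ jn →
      (∀ j', j ≤ j' → j' < jn → ¬ ("png".toList <+: sL.drop j')) →
      pvBLoop sL j (some i) = some (PySem.List.slice sL (some (i : Int)) (some ((jn : Int) + 3))) := by
    intro d
    induction d with
    | zero =>
      intro j hd hj _
      have : j = jn := by omega
      subst this
      unfold pvBLoop
      rw [if_pos hlt]
      simp only
      rw [if_pos ((PySem.Chars.startswith_iff _ _).2 hjn)]
    | succ d ih =>
      intro j hd hj hno
      unfold pvBLoop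
      rw [if_pos (by omega)]
      simp only
      rw [if_neg (fun hc => hno j le_rfl (by omega) ((PySem.Chars.startswith_iff _ _).1 hc))]
      exact ih (j + 1) (by omega) (by omega) (fun j' h1 h2 => hno j' (by omega) h2)
  exact fun j hj hno => main (jn - j) j rfl hj hno

-- the crux: A's outer loop from i equals B's pass from i with no start recorded
theorem pv_main (sL : List Char) : ∀ i, pvAOuter sL i = pvBLoop sL i none := by
  have main : ∀ d i, sL.length - i = d → pvAOuter sL i = pvBLoop sL i none := by
    intro d
    induction d with
    | zero =>
      intro i hd
      unfold pvAOuter pvBLoop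
      rw [if_neg (by omega), if_neg (by omega)]
    | succ d ih =>
      intro i hd
      by_cases hi : i < sL.length
      · by_cases hh : "https".toList <+: sL.drop i
        · -- first https found at i: compare A's inner loop with B's png phase
          have hA : pvAOuter sL i =
              match pvAInner sL i (i + 5) with
              | some u => some u
              | none => pvAOuter sL (i + 1) := by
            rw [pvAOuter, if_pos hi, if_pos ((pv_slice5 sL i).2 hh)]
          have hB : pvBLoop sL i none = pvBLoop sL (i + 1) (some i) := by
            rw [pvBLoop, if_pos hi,
                if_pos ((PySem.Chars.startswith_iff _ _).2 hh)]
          by_cases hIn : PySem.Chars.isIn "png".toList (sL.drop (i + 5)) = true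
          · -- a "png" exists at or after i+5: locate the first one
            have hf0 : 0 ≤ PySem.Chars.find (sL.drop (i + 5)) "png".toList :=
              (PySem.Chars.find_nonneg_iff _ _).2
                ((PySem.Chars.isIn_iff_infix _ _).1 hIn)
            obtain ⟨hp, hmin⟩ := PySem.Chars.find_spec hf0
            set jn := i + 5 + (PySem.Chars.find (sL.drop (i + 5)) "png".toList).toNat with hjndef
            rw [List.drop_drop] at hp
            have hmin' : ∀ j', i + 5 ≤ j' → j' < jn → ¬ ("png".toList <+: sL.drop j') := by
              intro j' h1 h2 hpj
              have h3 := hmin (j' - (i + 5)) (by omega)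
              rw [List.drop_drop, show i + 5 + (j' - (i + 5)) = j' by omega] at h3
              exact h3 hpj
            have hnoB : ∀ j', i + 1 ≤ j' → j' < jn → ¬ ("png".toList <+: sL.drop j') := by
              intro j' h1 h2
              by_cases h5 : j' < i + 5
              · exact pv_no_png_in_https sL i hh j' (by omega) h5
              · exact hmin' j' (by omega) h2
            rw [hA, pv_inner_found sL i jn hp (i + 5) (by omega)
                  (fun j' h1 h2 => hmin' j' h1 h2),
                hB, pvB_some_found sL i jn hp (i + 1) (by omega) hnoB]
          · -- no "png" from i+5 on: A exhausts the inner loop then the outer one; B's pass dies out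
            have hnone5 : ∀ j', i + 5 ≤ j' → ¬ ("png".toList <+: sL.drop j') := by
              intro j' h1 hpj
              apply (PySem.Chars.isIn_eq_false_iff _ _).1 (by simpa using hIn)
              apply (PySem.Chars.isIn_iff_infix _ _).1
              apply (PySem.Chars.exists_prefix_drop_iff_isIn _ _).1
              refine ⟨j' - (i + 5), ?_⟩
              rw [List.drop_drop, show i + 5 + (j' - (i + 5)) = j' by omega]
              exact hpj
            have hnoB : ∀ j', i + 1 ≤ j' → ¬ ("png".toList <+: sL.drop j') := by
              intro j' h1 hpj
              by_cases h5 : i + 5 ≤ j'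
              · exact hnone5 j' h5 hpj
              · exact pv_no_png_in_https sL i hh j' (by omega) (by omega) hpj
            rw [hA, pv_inner_none sL i (i + 5) hnone5 (i + 5) le_rfl,
                pv_outer_none sL (i + 5) hnone5 (i + 1) (by omega),
                hB, pvB_some_none sL i (i + 1) hnoB (i + 1) le_rfl]
        · have hA : pvAOuter sL i = pvAOuter sL (i + 1) := by
            rw [pvAOuter, if_pos hi,
                if_neg (fun hc => hh ((pv_slice5 sL i).1 hc))]
          have hB : pvBLoop sL i none = pvBLoop sL (i + 1) none := by
            rw [pvBLoop, if_pos hi,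
                if_neg (fun hc => hh ((PySem.Chars.startswith_iff _ _).1 hc))]
          rw [hA, hB]
          exact ih (i + 1) (by omega)
      · unfold pvAOuter pvBLoop
        rw [if_neg hi, if_neg hi]
  exact fun i => main (sL.length - i) i rfl

-- ===== VERDICT (by name: the statement is the Claim_ definition above) =====
theorem get_html_url_spec : Claim_equal_get_html_url := by
  intro inner _
  unfold Spec_get_html_url get_html_url get_html_url_alt
  rw [pv_main]
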